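-- pv_equiv track=rewrite | github.com/MD-ARMAN-Shanto/Problem-Solving | 2150-find-all-lonely-numbers-in-the-array/2150-find-all-lonely-numbers-in-the-array.py | findLonely
-- ===== SOURCE A (Python) =====
-- from typing import List
--
-- def findLonely(nums: List[int]) -> List[int]:
--
--     d = {}
--
--     for n in nums:
--         d[n] = d.get(n, 0) + 1
--
--     answer = []
--
--     for i in range(len(nums)):
--         if (nums[i]-1) not in d:
--             if (nums[i]+1) not in d:
--                 if d[nums[i]] == 1:
--                     answer.append(nums[i])
--
--     return answer
-- ===== SOURCE B (Python) =====
-- from typing import List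
--
-- def findLonely(nums: List[int]) -> List[int]:
--     s = sorted(nums)
--     lonely = set()
--     for i, v in enumerate(s):
--         if (i == 0 or s[i-1] < v - 1) and (i == len(s) - 1 or s[i+1] > v + 1):
--             lonely.add(v)
--     return [x for x in nums if x in lonely]
-- ===== Notes on version B (the rewrite author's own statement) =====
-- stated objective: alternative
-- what changed: Replaces the hash-counter plus per-element dict membership tests with sort-then-linear-scan: after sorting, an element is lonely iff its sorted neighbours differ by more than 1, which rules out duplicates and +-1 neighbours at once; a final pass over the original list preserves input order.
import Mathlib
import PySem

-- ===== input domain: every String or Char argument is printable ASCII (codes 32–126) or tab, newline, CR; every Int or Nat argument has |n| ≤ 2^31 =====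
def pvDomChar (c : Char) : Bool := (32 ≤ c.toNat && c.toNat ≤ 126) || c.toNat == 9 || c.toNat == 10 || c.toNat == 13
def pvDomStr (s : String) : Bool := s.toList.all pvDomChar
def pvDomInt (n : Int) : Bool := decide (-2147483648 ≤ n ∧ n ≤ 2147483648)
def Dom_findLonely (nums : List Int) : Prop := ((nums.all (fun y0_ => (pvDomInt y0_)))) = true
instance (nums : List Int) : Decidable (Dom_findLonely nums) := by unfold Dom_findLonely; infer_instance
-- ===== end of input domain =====

-- B replaces A's hash-counter with sort-then-linear-scan over sorted neighbours (alternative algorithm, same result in input order).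

-- ===== PORT A =====
def findLonely (nums : List Int) : List Int :=
  -- d = {}; for n in nums: d[n] = d.get(n, 0) + 1
  let d : PySem.Dict Int Int :=
    nums.foldl (fun d n => d.insert n (d.getD n 0 + 1)) PySem.Dict.empty
  -- for i in range(len(nums)): … ; nums[i] is always in range and nums[i] is always a key of d,
  -- so the defaults of pyGetD/getD are never used and the port is exact.
  (PySem.List.pyRange 0 (PySem.List.len nums)).foldl
    (fun answer i =>
      let x := PySem.List.pyGetD nums i 0
      if !(d.contains (x - 1)) then
        if !(d.contains (x + 1)) then
          if d.getD x 0 == 1 then answer ++ [x] else answer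
        else answer
      else answer) []

-- ===== PORT B =====
-- the loop test '(i == 0 or s[i-1] < v-1) and (i == len(s)-1 or s[i+1] > v+1)'
def pvCond (s : List Int) (iv : Int × Int) : Bool :=
  (iv.1 == 0 || PySem.List.pyGetD s (iv.1 - 1) 0 < iv.2 - 1) &&
  (iv.1 == PySem.List.len s - 1 || PySem.List.pyGetD s (iv.1 + 1) 0 > iv.2 + 1)

-- lonely = set(); for i, v in enumerate(s): if …: lonely.add(v)
def pvLonelySet (s : List Int) : PySem.Set Int :=
  (PySem.List.enumerate s).foldl
    (fun lon iv => if pvCond s iv then PySem.Set.add lon iv.2 else lon) PySem.Set.empty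

def findLonely_alt (nums : List Int) : List Int :=
  let s := PySem.List.sorted nums id
  -- [x for x in nums if x in lonely]  (only MEMBERSHIP of the set is consumed, never its order)
  nums.foldl (fun acc x => if PySem.Set.contains (pvLonelySet s) x then acc ++ [x] else acc) []

-- ===== PRECONDITION & SPEC =====
def Spec_findLonely (nums : List Int) (out : List Int) : Prop := out = findLonely_alt nums
instance (nums : List Int) (out : List Int) : Decidable (Spec_findLonely nums out) := by unfold Spec_findLonely; infer_instance

-- ===== CLAIM (what is proved, stated in full; the proofs are below) =====
def Claim_equal_findLonely : Prop := ∀ (nums : List Int), Dom_findLonely nums → Spec_findLonely nums (findLonely nums)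

-- ===== LEMMAS AND PROOFS =====

-- the predicate A's triple-nested membership test computes
def pvLonelyB (nums : List Int) (x : Int) : Bool :=
  !(nums.contains (x - 1)) && (!(nums.contains (x + 1)) && ((nums.count x : Int) == 1))

theorem pvA_eq_filter (nums : List Int) :
    findLonely nums = nums.filter (fun x => pvLonelyB nums x) := by
  unfold findLonely
  rw [PySem.Dict.foldl_insert_getD_add_one_eq_counter,
      PySem.List.foldl_pyRange_pyGetD nums 0
        (f := fun answer x =>
          if !((PySem.Dict.counter nums).contains (x - 1)) then
            if !((PySem.Dict.counter nums).contains (x + 1)) then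
              if (PySem.Dict.counter nums).getD x 0 == 1 then answer ++ [x] else answer
            else answer
          else answer) (init := []) (le_refl 0)]
  simp only [Int.toNat_zero, List.drop_zero]
  refine .trans (PySem.List.foldl_congr_mem _ _
      (fun answer x => if pvLonelyB nums x then answer ++ [x] else answer) _ ?_) ?_
  · intro acc x _
    simp only [PySem.Dict.contains_counter, PySem.Dict.getD_counter, pvLonelyB]
    by_cases h1 : (x - 1) ∈ nums <;>
      by_cases h2 : (x + 1) ∈ nums <;>
        by_cases h3 : (((nums.count x : Int)) == 1) = true <;>
          simp [h1, h2, h3]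
  · rw [PySem.List.foldl_append_if_eq_filter]
    simp

theorem pvB_eq_filter (nums : List Int) :
    findLonely_alt nums =
      nums.filter (fun x => PySem.Set.contains (pvLonelySet (PySem.List.sorted nums id)) x) := by
  unfold findLonely_alt
  rw [PySem.List.foldl_append_if_eq_filter]
  simp only [List.nil_append]

theorem pvMem_foldl_add (l : List (Int × Int)) (p : Int × Int → Bool) (s0 : PySem.Set Int) (y : Int) :
    (y ∈ l.foldl (fun lon iv => if p iv then PySem.Set.add lon iv.2 else lon) s0) ↔
      y ∈ s0 ∨ ∃ iv, iv ∈ l ∧ p iv = true ∧ iv.2 = y := by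
  induction l generalizing s0 with
  | nil => simp
  | cons a l ih =>
    simp only [List.foldl_cons, List.mem_cons]
    by_cases hp : p a = true
    · simp only [hp, if_true, ih, PySem.Set.mem_add]
      constructor
      · rintro (⟨h | h⟩ | ⟨iv, hm, hpv, hv⟩)
        · exact Or.inl h
        · exact Or.inr ⟨a, Or.inl rfl, hp, h.symm⟩
        · exact Or.inr ⟨iv, Or.inr hm, hpv, hv⟩
      · rintro (h | ⟨iv, (rfl | hm), hpv, hv⟩)
        · exact Or.inl (Or.inl h)
        · exact Or.inl (Or.inr hv.symm)
        · exact Or.inr ⟨iv, hm, hpv, hv⟩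
    · simp only [hp, ih]
      constructor
      · rintro (h | ⟨iv, hm, hpv, hv⟩)
        · exact Or.inl h
        · exact Or.inr ⟨iv, Or.inr hm, hpv, hv⟩
      · rintro (h | ⟨iv, (rfl | hm), hpv, hv⟩)
        · exact Or.inl h
        · exact absurd hpv hp
        · exact Or.inr ⟨iv, hm, hpv, hv⟩

-- the heart: on a sorted list, the neighbour test at index k is exactly "no x-1, no x+1, unique x"
theorem pvCond_iff (s : List Int) (hs : List.Pairwise (· ≤ ·) s) (k : Nat) (hk : k < s.length) :
    pvCond s ((k : Int), s[k]) = true ↔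
      ((s[k] - 1) ∉ s ∧ (s[k] + 1) ∉ s ∧ s.count s[k] = 1) := by
  have mono : ∀ i j (hi : i < s.length) (hj : j < s.length), i ≤ j → s[i] ≤ s[j] := by
    intro i j hi hj hij
    rcases Nat.eq_or_lt_of_le hij with h | h
    · subst h; exact le_rfl
    · exact List.pairwise_iff_getElem.mp hs i j hi hj h
  have hsplit : s = s.take k ++ s[k] :: s.drop (k + 1) := by
    conv_lhs => rw [← List.take_append_drop k s, List.drop_eq_getElem_cons hk]
  have hct0 : ∀ y : Int, s.count y =
      (s.take k).count y + ((s.drop (k + 1)).count y + (if y = s[k] then 1 else 0)) := by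
    intro y
    conv_lhs => rw [hsplit]
    rw [List.count_append, List.count_cons]
    rcases eq_or_ne y s[k] with h | h
    · simp [h]
    · simp [h, Ne.symm h]
  have hct : s.count s[k] = (s.take k).count s[k] + ((s.drop (k + 1)).count s[k] + 1) := by
    have := hct0 s[k]
    simpa using this
  have hgetm1 : 1 ≤ k → PySem.List.pyGetD s ((k : Int) - 1) 0 = s[k - 1]'(by omega) := by
    intro h1
    rw [PySem.List.pyGetD_eq_getElem s 0 (by omega) (by omega)]
    congr 1
    omega
  have hgetp1 : ∀ (h1 : k + 1 < s.length), PySem.List.pyGetD s ((k : Int) + 1) 0 = s[k + 1]'h1 := by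
    intro h1
    rw [PySem.List.pyGetD_eq_getElem s 0 (by omega) (by omega)]
    congr 1
  simp only [pvCond, Bool.and_eq_true, Bool.or_eq_true, beq_iff_eq, decide_eq_true_iff,
    PySem.List.len]
  constructor
  · rintro ⟨h1, h2⟩
    have hub : ∀ j (hj : j < s.length), j < k → s[j] < s[k] - 1 := by
      intro j hj hjk
      rcases h1 with h10 | h1lt
      · omega
      · rw [hgetm1 (by omega)] at h1lt
        calc s[j] ≤ s[k - 1]'(by omega) := mono j (k - 1) hj (by omega) (by omega)
          _ < s[k] - 1 := h1lt
    have hlb : ∀ j (hj : j < s.length), k < j → s[k] + 1 < s[j] := by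
      intro j hj hjk
      rcases h2 with h20 | h2lt
      · omega
      · rw [hgetp1 (by omega)] at h2lt
        calc s[k] + 1 < s[k + 1]'(by omega) := h2lt
          _ ≤ s[j] := mono (k + 1) j (by omega) hj (by omega)
    refine ⟨?_, ?_, ?_⟩
    · intro hmem
      obtain ⟨j, hj, hje⟩ := List.mem_iff_getElem.mp hmem
      rcases Nat.lt_trichotomy j k with h | h | h
      · have := hub j hj h; omega
      · subst h; omega
      · have := hlb j hj h; omega
    · intro hmem
      obtain ⟨j, hj, hje⟩ := List.mem_iff_getElem.mp hmem
      rcases Nat.lt_trichotomy j k with h | h | h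
      · have := hub j hj h; omega
      · subst h; omega
      · have := hlb j hj h; omega
    · have htake : s[k] ∉ s.take k := by
        intro hmem
        obtain ⟨j, hj, hje⟩ := List.mem_take_iff_getElem.mp hmem
        have := hub j (by omega) (by omega); omega
      have hdrop : s[k] ∉ s.drop (k + 1) := by
        intro hmem
        obtain ⟨j, hj, hje⟩ := List.mem_iff_getElem.mp hmem
        rw [List.getElem_drop] at hje
        have hlen : (s.drop (k + 1)).length = s.length - (k + 1) := by simp
        have := hlb (k + 1 + j) (by omega) (by omega)
        omega
      rw [hct, List.count_eq_zero.mpr htake, List.count_eq_zero.mpr hdrop]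
  · rintro ⟨hm1, hp1, hcount⟩
    have htake0 : (s.take k).count s[k] = 0 := by omega
    have hdrop0 : (s.drop (k + 1)).count s[k] = 0 := by omega
    have htake : s[k] ∉ s.take k := List.count_eq_zero.mp htake0
    have hdrop : s[k] ∉ s.drop (k + 1) := List.count_eq_zero.mp hdrop0
    constructor
    · by_cases hk0 : k = 0
      · exact Or.inl (by omega)
      · refine Or.inr ?_
        rw [hgetm1 (by omega)]
        have hle : s[k - 1]'(by omega) ≤ s[k] := mono (k - 1) k (by omega) hk (by omega)
        have hne : s[k - 1]'(by omega) ≠ s[k] := by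
          intro he
          exact htake (he ▸ List.mem_take_iff_getElem.mpr ⟨k - 1, by omega, rfl⟩)
        have hne1 : s[k - 1]'(by omega) ≠ s[k] - 1 := by
          intro he
          exact hm1 (he ▸ List.getElem_mem (by omega))
        omega
    · by_cases hkl : k = s.length - 1
      · exact Or.inl (by omega)
      · refine Or.inr ?_
        have hk1 : k + 1 < s.length := by omega
        rw [hgetp1 hk1]
        have hle : s[k] ≤ s[k + 1] := mono k (k + 1) hk (by omega) (by omega)
        have hne : s[k + 1] ≠ s[k] := by
          intro he
          refine hdrop ?_
          rw [List.mem_iff_getElem]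
          exact ⟨0, by simp; omega, by rw [List.getElem_drop]; simpa using he⟩
        have hne1 : s[k + 1] ≠ s[k] + 1 := by
          intro he
          exact hp1 (he ▸ List.getElem_mem hk1)
        omega

theorem pvMem_lonelySet (s : List Int) (hs : List.Pairwise (· ≤ ·) s) (y : Int) :
    y ∈ pvLonelySet s ↔ (y ∈ s ∧ (y - 1) ∉ s ∧ (y + 1) ∉ s ∧ s.count y = 1) := by
  unfold pvLonelySet
  rw [pvMem_foldl_add]
  constructor
  · rintro (h | ⟨iv, hm, hpv, hv⟩)
    · simp [PySem.Set.empty] at h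
    · obtain ⟨k, hk, he⟩ := (PySem.List.mem_enumerate_iff s 0 iv).mp hm
      subst he
      simp only [] at hpv hv
      subst hv
      have := (pvCond_iff s hs k hk).mp (by simpa using hpv)
      exact ⟨List.getElem_mem hk, this⟩
  · rintro ⟨hy, h1, h2, h3⟩
    obtain ⟨k, hk, he⟩ := List.mem_iff_getElem.mp hy
    subst he
    refine Or.inr ⟨((k : Int), s[k]), ?_, ?_, rfl⟩
    · exact (PySem.List.mem_enumerate_iff s 0 _).mpr ⟨k, hk, by simp⟩
    · exact (pvCond_iff s hs k hk).mpr ⟨h1, h2, h3⟩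

-- ===== VERDICT (by name: the statement is the Claim_ definition above) =====
theorem findLonely_spec : Claim_equal_findLonely := by
  intro nums _
  unfold Spec_findLonely
  rw [pvA_eq_filter, pvB_eq_filter]
  apply List.filter_congr
  intro x hx
  set s := PySem.List.sorted nums id with hsdef
  have hperm : s.Perm nums := PySem.List.sorted_perm nums id false
  have hs : List.Pairwise (· ≤ ·) s := by
    have := PySem.List.sorted_pairwise nums id
    simpa [hsdef] using this
  rw [Bool.eq_iff_iff]
  have hcontains : ∀ (l : PySem.Set Int) (z : Int), PySem.Set.contains l z = true ↔ z ∈ l := by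
    intro l z; simp [PySem.Set.contains]
  rw [hcontains, pvMem_lonelySet s hs x]
  simp only [pvLonelyB, Bool.and_eq_true, Bool.not_eq_true', beq_iff_eq,
    hperm.mem_iff, hperm.count_eq]
  constructor
  · rintro ⟨h1, h2, h3⟩
    refine ⟨hx, by simpa using h1, by simpa using h2, by omega⟩
  · rintro ⟨_, h1, h2, h3⟩
    refine ⟨by simpa using h1, by simpa using h2, by omega⟩
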